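-- pv_equiv track=rewrite | github.com/reefgenomics/SymPortal_framework | data_analysis.py | _set_basal_seq
-- ===== SOURCE A (Python) =====
-- def _set_basal_seq(list_of_ref_seq_names):
--     basal_set = set()
--     found_c15_a = False
--     for name in list_of_ref_seq_names:
--         if name == 'C3':
--             basal_set.add('C3')
--         elif name == 'C1':
--             basal_set.add('C1')
--         elif 'C15' in name and not found_c15_a:
--             basal_set.add('C15')
--             found_c15_a = True
--
--     if len(basal_set) == 1:
--         return list(basal_set)[0]
--     elif len(basal_set) > 1:
--         raise RuntimeError(f'basal seq set {basal_set} contains more than one ref seq')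
--     else:
--         return None
-- ===== SOURCE B (Python) =====
-- def _set_basal_seq(list_of_ref_seq_names):
--     basal_set = set()
--     if 'C3' in list_of_ref_seq_names:
--         basal_set.add('C3')
--     if 'C1' in list_of_ref_seq_names:
--         basal_set.add('C1')
--     if any('C15' in name for name in list_of_ref_seq_names):
--         basal_set.add('C15')
--     if len(basal_set) == 1:
--         return basal_set.pop()
--     elif len(basal_set) > 1:
--         raise RuntimeError(f'basal seq set {basal_set} contains more than one ref seq')
--     else:
--         return None
-- ===== Notes on version B (the rewrite author's own statement) =====
-- stated objective: idiomatic
-- what changed: Replaces the single accumulating loop with per-element branch chain and a redundant found_c15_a flag by three independent membership scans ('C3' in names, 'C1' in names, any('C15' in n)) that build the set directly, keeping the same final collapse.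
import Mathlib
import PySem

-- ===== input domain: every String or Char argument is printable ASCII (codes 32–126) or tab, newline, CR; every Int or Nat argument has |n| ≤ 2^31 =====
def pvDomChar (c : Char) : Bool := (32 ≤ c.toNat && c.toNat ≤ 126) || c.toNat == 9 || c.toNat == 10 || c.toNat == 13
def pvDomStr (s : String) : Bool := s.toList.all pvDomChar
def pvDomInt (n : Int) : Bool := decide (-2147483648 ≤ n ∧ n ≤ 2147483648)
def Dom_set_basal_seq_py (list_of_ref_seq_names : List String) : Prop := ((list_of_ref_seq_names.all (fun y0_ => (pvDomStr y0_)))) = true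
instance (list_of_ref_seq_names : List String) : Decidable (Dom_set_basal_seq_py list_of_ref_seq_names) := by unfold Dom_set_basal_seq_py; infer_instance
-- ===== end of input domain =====

-- B replaces A's single accumulating loop (with its redundant found_c15_a flag) by three
-- independent membership scans that build the set directly; same return value on Pre_ (not faster).


-- ===== PORT A =====
-- one step of A's loop: the branch chain on one name, over the state (basal_set, found_c15_a)
def pvStepA (st : PySem.Set String × Bool) (name : String) : PySem.Set String × Bool :=
  if name = "C3" then (PySem.Set.add st.1 "C3", st.2)
  else if name = "C1" then (PySem.Set.add st.1 "C1", st.2)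
  else if PySem.Str.isIn "C15" name && !st.2 then (PySem.Set.add st.1 "C15", true)
  else st

def set_basal_seq_py (list_of_ref_seq_names : List String) : Option String :=
  let st := list_of_ref_seq_names.foldl pvStepA (PySem.Set.empty, false)
  if st.1.length = 1 then st.1[0]?
  else none  -- len > 1: Python raises RuntimeError (excluded by Pre_); len 0: Python returns None

-- ===== PORT B =====
-- B's basal_set after its three independent membership checks
def pvSetB (list_of_ref_seq_names : List String) : PySem.Set String :=
  let s : PySem.Set String := PySem.Set.empty
  let s := if list_of_ref_seq_names.contains "C3" then PySem.Set.add s "C3" else s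
  let s := if list_of_ref_seq_names.contains "C1" then PySem.Set.add s "C1" else s
  if list_of_ref_seq_names.any (fun n => PySem.Str.isIn "C15" n) then PySem.Set.add s "C15" else s

def set_basal_seq_py_alt (list_of_ref_seq_names : List String) : Option String :=
  let s := pvSetB list_of_ref_seq_names
  if s.length = 1 then s[0]?
  else none  -- len > 1: raises (excluded by Pre_); len 0: None

-- ===== PRECONDITION & SPEC =====
-- Pre_ excludes exactly the inputs on which Python A raises RuntimeError: lists containing
-- more than one basal candidate among {'C3' present, 'C1' present, some name containing 'C15'}.
def Pre_set_basal_seq_py (list_of_ref_seq_names : List String) : Prop :=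
  ((if "C3" ∈ list_of_ref_seq_names then 1 else 0)
   + (if "C1" ∈ list_of_ref_seq_names then 1 else 0)
   + (if ∃ n ∈ list_of_ref_seq_names, PySem.Str.isIn "C15" n = true then 1 else 0) : Nat) ≤ 1
instance (list_of_ref_seq_names : List String) : Decidable (Pre_set_basal_seq_py list_of_ref_seq_names) := by unfold Pre_set_basal_seq_py; infer_instance
def pvWitness_set_basal_seq_py : List String := ["D1", "C3", "C3"]

def Spec_set_basal_seq_py (list_of_ref_seq_names : List String) (out : Option String) : Prop := out = set_basal_seq_py_alt list_of_ref_seq_names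
instance (list_of_ref_seq_names : List String) (out : Option String) : Decidable (Spec_set_basal_seq_py list_of_ref_seq_names out) := by unfold Spec_set_basal_seq_py; infer_instance

-- ===== CLAIM (what is proved, stated in full; the proofs are below) =====
def Claim_equal_set_basal_seq_py : Prop := ∀ (list_of_ref_seq_names : List String), Dom_set_basal_seq_py list_of_ref_seq_names → Pre_set_basal_seq_py list_of_ref_seq_names → Spec_set_basal_seq_py list_of_ref_seq_names (set_basal_seq_py list_of_ref_seq_names)

-- ===== LEMMAS AND PROOFS =====

theorem pvC15_not_in_C3 : PySem.Str.isIn "C15" "C3" = false := by decide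
theorem pvC15_not_in_C1 : PySem.Str.isIn "C15" "C1" = false := by decide

-- membership in A's folded set, for any start state
theorem pvFoldA_mem (l : List String) (s : PySem.Set String) (f : Bool) (y : String) :
    y ∈ (l.foldl pvStepA (s, f)).1 ↔
      y ∈ s ∨ (y = "C3" ∧ "C3" ∈ l) ∨ (y = "C1" ∧ "C1" ∈ l)
        ∨ (y = "C15" ∧ f = false ∧ ∃ n ∈ l, PySem.Str.isIn "C15" n = true) := by
  induction l generalizing s f with
  | nil => simp
  | cons name t ih =>
    rw [List.foldl_cons]
    by_cases h3 : name = "C3"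
    · subst h3
      rw [show pvStepA (s, f) "C3" = (PySem.Set.add s "C3", f) from by simp [pvStepA], ih,
        List.exists_mem_cons_iff]
      simp only [PySem.Set.mem_add, List.mem_cons, pvC15_not_in_C3, Bool.false_eq_true,
        false_or, eq_self_iff_true, true_or, and_true]
      tauto
    · by_cases h1 : name = "C1"
      · subst h1
        rw [show pvStepA (s, f) "C1" = (PySem.Set.add s "C1", f) from by simp [pvStepA], ih,
          List.exists_mem_cons_iff]
        simp only [PySem.Set.mem_add, List.mem_cons, pvC15_not_in_C1, Bool.false_eq_true,
          false_or, eq_self_iff_true, true_or, and_true]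
        tauto
      · by_cases hin : PySem.Str.isIn "C15" name = true
        · cases f with
          | false =>
            rw [show pvStepA (s, false) name = (PySem.Set.add s "C15", true) from by
                  unfold pvStepA; rw [if_neg h3, if_neg h1, hin]; simp, ih,
              List.exists_mem_cons_iff]
            simp only [PySem.Set.mem_add, List.mem_cons, hin, Bool.true_eq_false,
              true_and, false_and, true_or]
            tauto
          | true =>
            rw [show pvStepA (s, true) name = (s, true) from by
                  simp [pvStepA, h3, h1], ih, List.exists_mem_cons_iff]
            simp only [List.mem_cons, Bool.true_eq_false, false_and, and_false, or_false]
            tauto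
        · have hf : PySem.Str.isIn "C15" name = false := by rwa [Bool.not_eq_true] at hin
          rw [show pvStepA (s, f) name = (s, f) from by
                unfold pvStepA; rw [if_neg h3, if_neg h1, hf]; simp, ih,
            List.exists_mem_cons_iff]
          simp only [List.mem_cons, Bool.not_eq_true] at hin ⊢
          rw [hin]
          simp only [Bool.false_eq_true, false_or]
          tauto

theorem pvFoldA_nodup (l : List String) (s : PySem.Set String) (f : Bool) (hs : s.Nodup) :
    (l.foldl pvStepA (s, f)).1.Nodup := by
  induction l generalizing s f with
  | nil => exact hs
  | cons name t ih =>
    rw [List.foldl_cons]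
    unfold pvStepA
    split_ifs <;> exact ih _ _ (by first | exact PySem.Set.nodup_add _ _ hs | exact hs)

-- membership through one conditional add
theorem pvMemIteAdd (c : Prop) [Decidable c] (s : PySem.Set String) (x y : String) :
    (y ∈ if c then PySem.Set.add s x else s) ↔ y ∈ s ∨ (c ∧ y = x) := by
  split_ifs with h <;> simp [PySem.Set.mem_add, h]

theorem pvNodupIteAdd (c : Prop) [Decidable c] (s : PySem.Set String) (x : String)
    (hs : s.Nodup) : (if c then PySem.Set.add s x else s).Nodup := by
  split_ifs <;> first | exact PySem.Set.nodup_add _ _ hs | exact hs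

-- membership in B's built set
theorem pvSetB_mem (l : List String) (y : String) :
    y ∈ pvSetB l ↔
      (y = "C3" ∧ "C3" ∈ l) ∨ (y = "C1" ∧ "C1" ∈ l)
        ∨ (y = "C15" ∧ ∃ n ∈ l, PySem.Str.isIn "C15" n = true) := by
  unfold pvSetB
  rw [pvMemIteAdd, pvMemIteAdd, pvMemIteAdd]
  simp only [PySem.Set.empty, List.not_mem_nil, false_or, List.contains_iff_mem,
    List.any_eq_true]
  tauto

theorem pvSetB_nodup (l : List String) : (pvSetB l).Nodup := by
  unfold pvSetB
  exact pvNodupIteAdd _ _ _ (pvNodupIteAdd _ _ _ (pvNodupIteAdd _ _ _ List.nodup_nil))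

-- a Nodup list whose elements all equal c is [] or [c]
theorem pvNodupSub (L : List String) (c : String) (hn : L.Nodup) (h : ∀ y ∈ L, y = c) :
    L = [] ∨ L = [c] := by
  cases L with
  | nil => exact Or.inl rfl
  | cons a t =>
    have ha : a = c := h a (by simp)
    subst ha
    right
    have : t = [] := by
      cases t with
      | nil => rfl
      | cons b u =>
        have hb : b = a := h b (by simp)
        simp [hb] at hn
    simp [this]

-- two Nodup lists, all elements = c, same membership → equal
theorem pvEqOfMem (L M : List String) (c : String) (hnL : L.Nodup) (hnM : M.Nodup)
    (hL : ∀ y ∈ L, y = c) (hM : ∀ y ∈ M, y = c) (hmem : ∀ y, y ∈ L ↔ y ∈ M) : L = M := by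
  rcases pvNodupSub L c hnL hL with h | h <;> rcases pvNodupSub M c hnM hM with h' | h' <;>
    subst h <;> subst h'
  · rfl
  · exact absurd ((hmem c).mpr (by simp)) (by simp)
  · exact absurd ((hmem c).mp (by simp)) (by simp)
  · rfl

-- under Pre_, A's folded set equals B's set
theorem pvSets_eq (l : List String) (hpre : Pre_set_basal_seq_py l) :
    (l.foldl pvStepA (PySem.Set.empty, false)).1 = pvSetB l := by
  unfold Pre_set_basal_seq_py at hpre
  have hmem : ∀ y, y ∈ (l.foldl pvStepA (PySem.Set.empty, false)).1 ↔ y ∈ pvSetB l := by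
    intro y
    rw [pvFoldA_mem, pvSetB_mem]
    constructor
    · rintro (he | h | h | ⟨hy, _, hex⟩)
      · exact absurd he List.not_mem_nil
      · tauto
      · tauto
      · exact Or.inr (Or.inr ⟨hy, hex⟩)
    · rintro (h | h | ⟨hy, hex⟩)
      · tauto
      · tauto
      · exact Or.inr (Or.inr (Or.inr ⟨hy, rfl, hex⟩))
  have hnA := pvFoldA_nodup l PySem.Set.empty false List.nodup_nil
  have hnB := pvSetB_nodup l
  by_cases h3 : "C3" ∈ l
  · have h1 : "C1" ∉ l := by
      intro hh; rw [if_pos h3, if_pos hh] at hpre; split_ifs at hpre <;> omega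
    have h15 : ¬ ∃ n ∈ l, PySem.Str.isIn "C15" n = true := by
      intro hh; rw [if_pos h3, if_pos hh] at hpre; split_ifs at hpre <;> omega
    refine pvEqOfMem _ _ "C3" hnA hnB ?_ ?_ hmem
    · intro y hy
      rw [pvFoldA_mem] at hy
      rcases hy with he | ⟨h, _⟩ | ⟨h, hm⟩ | ⟨h, _, hex⟩
      · exact absurd he List.not_mem_nil
      · exact h
      · exact absurd hm h1
      · exact absurd hex h15
    · intro y hy
      rw [pvSetB_mem] at hy
      rcases hy with ⟨h, _⟩ | ⟨h, hm⟩ | ⟨h, hex⟩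
      · exact h
      · exact absurd hm h1
      · exact absurd hex h15
  · by_cases h1 : "C1" ∈ l
    · have h15 : ¬ ∃ n ∈ l, PySem.Str.isIn "C15" n = true := by
        intro hh; rw [if_neg h3, if_pos h1, if_pos hh] at hpre; omega
      refine pvEqOfMem _ _ "C1" hnA hnB ?_ ?_ hmem
      · intro y hy
        rw [pvFoldA_mem] at hy
        rcases hy with he | ⟨h, hm⟩ | ⟨h, _⟩ | ⟨h, _, hex⟩
        · exact absurd he List.not_mem_nil
        · exact absurd hm h3
        · exact h
        · exact absurd hex h15
      · intro y hy
        rw [pvSetB_mem] at hy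
        rcases hy with ⟨h, hm⟩ | ⟨h, _⟩ | ⟨h, hex⟩
        · exact absurd hm h3
        · exact h
        · exact absurd hex h15
    · refine pvEqOfMem _ _ "C15" hnA hnB ?_ ?_ hmem
      · intro y hy
        rw [pvFoldA_mem] at hy
        rcases hy with he | ⟨h, hm⟩ | ⟨h, hm⟩ | ⟨h, _, _⟩
        · exact absurd he List.not_mem_nil
        · exact absurd hm h3
        · exact absurd hm h1
        · exact h
      · intro y hy
        rw [pvSetB_mem] at hy
        rcases hy with ⟨h, hm⟩ | ⟨h, hm⟩ | ⟨h, _⟩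
        · exact absurd hm h3
        · exact absurd hm h1
        · exact h

-- ===== VERDICT (by name: the statement is the Claim_ definition above) =====
theorem set_basal_seq_py_spec : Claim_equal_set_basal_seq_py := by
  intro l _ hpre
  unfold Spec_set_basal_seq_py set_basal_seq_py set_basal_seq_py_alt
  simp only [pvSets_eq l hpre]
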